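-- pv_equiv track=rewrite | github.com/Omykronn/INFO-MPSI-2021-2022 | grands_carres.py | colonneZeros
-- ===== SOURCE A (Python) =====
-- def colonneZeros(tab2, n):
--     col = [[0 for _ in range(n)] for _ in range(n)]
--
--     for j in range(n):
--         for i in range(n):
--             if tab2[i][j] == 0:
--                 if i == 0:  # Si Case la plus haute case : donc forcement 1
--                     col[i][j] = 1
--                 else:  # Si pas la case la plus haute : +1 de la précédente
--                     col[i][j] = col[i - 1][j] + 1
--             else:
--                 col[i][j] = 0
--
--     return col
-- ===== SOURCE B (Python) =====
-- def _zeroPrefix(column):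
--     m = 0
--     while m < len(column) and column[m] == 0:
--         m += 1
--     return m
--
--
-- def _runs(column):
--     # replace each maximal run of zeros by 1..len(run), each nonzero by 0
--     if not column:
--         return []
--     if column[0] == 0:
--         m = _zeroPrefix(column)
--         return list(range(1, m + 1)) + _runs(column[m:])
--     return [0] + _runs(column[1:])
--
--
-- def colonneZeros(tab2, n):
--     cols = [_runs([tab2[i][j] for i in range(n)]) for j in range(n)]
--     return [[cols[j][i] for j in range(n)] for i in range(n)]
-- ===== Notes on version B (the rewrite author's own statement) =====
-- stated objective: alternative
-- what changed: B extracts each column, segments it into maximal runs of zeros and rewrites each run to 1..len(run) at once (nonzeros to 0), then transposes the per-column results back into rows, instead of A's cell-by-cell DP that reads the previous cell back out of the partially-filled output grid.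
import Mathlib
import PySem

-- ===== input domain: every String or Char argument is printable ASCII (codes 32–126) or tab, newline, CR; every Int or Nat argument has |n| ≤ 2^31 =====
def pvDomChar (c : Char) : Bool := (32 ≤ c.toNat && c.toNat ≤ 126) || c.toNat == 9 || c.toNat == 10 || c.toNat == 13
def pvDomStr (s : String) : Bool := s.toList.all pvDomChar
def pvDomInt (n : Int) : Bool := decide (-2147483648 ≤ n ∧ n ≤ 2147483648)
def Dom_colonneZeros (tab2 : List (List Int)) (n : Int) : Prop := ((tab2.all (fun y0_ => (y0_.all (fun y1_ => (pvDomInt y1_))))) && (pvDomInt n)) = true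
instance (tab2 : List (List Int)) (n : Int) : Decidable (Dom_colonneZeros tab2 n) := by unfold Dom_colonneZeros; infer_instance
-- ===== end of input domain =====

-- B extracts each column, rewrites each maximal run of zeros to 1..len(run) (nonzeros to 0)
-- by run segmentation, and transposes the result back — instead of A's cell-by-cell
-- DP recurrence that reads the previous cell out of the partially-filled grid (objective: alternative).

-- ===== PORT A =====
-- literal transliteration of A: column-major double loop, in-place cell updates.
-- pyGetD's default is only reached where Python raises IndexError (excluded by Pre_).
def colonneZeros (tab2 : List (List Int)) (n : Int) : List (List Int) :=
  let col0 := (PySem.List.pyRange 0 n 1).map (fun _ => (PySem.List.pyRange 0 n 1).map (fun _ => (0 : Int)))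
  (PySem.List.pyRange 0 n 1).foldl (fun col j =>
    (PySem.List.pyRange 0 n 1).foldl (fun col i =>
      if PySem.List.pyGetD (PySem.List.pyGetD tab2 i []) j 0 = 0 then
        if i = 0 then
          col.set i.toNat ((col.getD i.toNat []).set j.toNat 1)
        else
          col.set i.toNat ((col.getD i.toNat []).set j.toNat
            (PySem.List.pyGetD (PySem.List.pyGetD col (i - 1) []) j 0 + 1))
      else
        col.set i.toNat ((col.getD i.toNat []).set j.toNat 0)) col) col0

-- ===== PORT B =====
-- port of B's _zeroPrefix: length of the leading all-zero prefix (the inner while loop)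
def zeroPrefixB : List Int → Nat
  | [] => 0
  | x :: xs => if x = 0 then zeroPrefixB xs + 1 else 0

lemma zeroPrefixB_pos (x : Int) (xs : List Int) (h : x = 0) :
    1 ≤ zeroPrefixB (x :: xs) := by
  simp [zeroPrefixB, h]

-- port of B's _runs: while loop over the remaining suffix of the column, accumulator out
def runsB (out : List Int) (column : List Int) : List Int :=
  match column with
  | [] => out
  | x :: xs =>
    if h : x = 0 then
      let m := zeroPrefixB (x :: xs)
      runsB (out ++ PySem.List.pyRange 1 ((m : Int) + 1) 1) ((x :: xs).drop m)
    else
      runsB (out ++ [0]) xs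
termination_by column.length
decreasing_by
  · have := zeroPrefixB_pos x xs h
    simp only [List.length_drop, List.length_cons]
    omega
  · simp

-- literal transliteration of B: per-column run segmentation, then transpose back.
def colonneZeros_alt (tab2 : List (List Int)) (n : Int) : List (List Int) :=
  let cols := (PySem.List.pyRange 0 n 1).map (fun j =>
    runsB [] ((PySem.List.pyRange 0 n 1).map (fun i =>
      PySem.List.pyGetD (PySem.List.pyGetD tab2 i []) j 0)))
  (PySem.List.pyRange 0 n 1).map (fun i =>
    (PySem.List.pyRange 0 n 1).map (fun j =>
      PySem.List.pyGetD (PySem.List.pyGetD cols j []) i 0))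

-- ===== PRECONDITION & SPEC =====
-- Pre_ excludes exactly the inputs on which the Python A raises IndexError:
-- tab2 (or one of its first n rows) shorter than n.
def Pre_colonneZeros (tab2 : List (List Int)) (n : Int) : Prop :=
  n.toNat ≤ tab2.length ∧ ∀ r ∈ tab2.take n.toNat, n.toNat ≤ r.length
instance (tab2 : List (List Int)) (n : Int) : Decidable (Pre_colonneZeros tab2 n) := by
  unfold Pre_colonneZeros; infer_instance
def pvWitness_colonneZeros : List (List Int) × Int := ([[0, 1], [0, 0]], 2)

def Spec_colonneZeros (tab2 : List (List Int)) (n : Int) (out : List (List Int)) : Prop := out = colonneZeros_alt tab2 n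
instance (tab2 : List (List Int)) (n : Int) (out : List (List Int)) : Decidable (Spec_colonneZeros tab2 n out) := by unfold Spec_colonneZeros; infer_instance

-- ===== CLAIM (what is proved, stated in full; the proofs are below) =====
def Claim_equal_colonneZeros : Prop := ∀ (tab2 : List (List Int)) (n : Int), Dom_colonneZeros tab2 n → Pre_colonneZeros tab2 n → Spec_colonneZeros tab2 n (colonneZeros tab2 n)

-- ===== LEMMAS AND PROOFS =====

-- tab2[i][j] as both ports read it, at Nat indices
def tcell (tab2 : List (List Int)) (i j : Nat) : Int :=
  PySem.List.pyGetD (PySem.List.pyGetD tab2 (i : Int) []) (j : Int) 0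

-- the intended grid cell: length of the run of zeros in column j ending at row i
def gcell (tab2 : List (List Int)) : Nat → Nat → Int
  | 0, j => if tcell tab2 0 j = 0 then 1 else 0
  | (i+1), j => if tcell tab2 (i+1) j = 0 then gcell tab2 i j + 1 else 0

def grid (tab2 : List (List Int)) (N : Nat) : List (List Int) :=
  (List.range N).map (fun i => (List.range N).map (gcell tab2 i))

lemma range_cast (n : Int) :
    PySem.List.pyRange 0 n 1 = List.map (fun k : Nat => (k : Int)) (List.range n.toNat) := by
  rw [PySem.List.pyRange_one]
  simp

lemma getD_map_range' {α : Type} [Inhabited α] (f : Nat → α) (N i : Nat) (hi : i < N) (d : α) :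
    ((List.range N).map f).getD i d = f i := by
  rw [List.getD_eq_getElem?_getD]
  simp [hi]

lemma set_map_range {α : Type} (f : Nat → α) (N i : Nat) (x : α) :
    ((List.range N).map f).set i x = (List.range N).map (fun r => if r = i then x else f r) := by
  apply List.ext_getElem
  · simp
  · intro k h1 h2
    simp only [List.getElem_set, List.getElem_map, List.getElem_range]
    split_ifs with h h' h' <;> first | rfl | omega

-- ---- B: runsB is the running-counter scan ----

def runScan (r : Int) : List Int → List Int
  | [] => []
  | x :: xs => let v := if x = 0 then r + 1 else 0; v :: runScan v xs

lemma runScan_prefix (c : List Int) : ∀ r : Int,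
    runScan r c = (List.range (zeroPrefixB c)).map (fun k : Nat => r + (k : Int) + 1)
      ++ runScan 0 (c.drop (zeroPrefixB c)) := by
  induction c with
  | nil => intro r; simp [zeroPrefixB, runScan]
  | cons x xs ih =>
    intro r
    by_cases hx : x = 0
    · have hm : zeroPrefixB (x :: xs) = zeroPrefixB xs + 1 := by simp [zeroPrefixB, hx]
      have hhead : runScan r (x :: xs) = (r + 1) :: runScan (r + 1) xs := by
        simp [runScan, hx]
      rw [hhead, ih (r + 1), hm, List.range_succ_eq_map, List.map_cons, List.map_map,
        List.drop_succ_cons, List.cons_append]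
      congr 1
      · push_cast; ring
      congr 1
      apply List.map_congr_left
      intro k _
      simp only [Function.comp_apply]
      push_cast
      ring
    · have hm : zeroPrefixB (x :: xs) = 0 := by simp [zeroPrefixB, hx]
      rw [hm]
      simp [runScan, hx]

lemma runsB_eq_runScan : ∀ (N : Nat) (c : List Int), c.length ≤ N → ∀ out : List Int,
    runsB out c = out ++ runScan 0 c := by
  intro N
  induction N with
  | zero =>
    intro c hc out
    have : c = [] := by
      cases c with
      | nil => rfl
      | cons x xs => simp at hc
    subst this
    simp [runsB, runScan]
  | succ N ih =>
    intro c hc out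
    cases c with
    | nil => simp [runsB, runScan]
    | cons x xs =>
      by_cases hx : x = 0
      · rw [runsB]
        rw [dif_pos hx]
        have hm1 : 1 ≤ zeroPrefixB (x :: xs) := zeroPrefixB_pos x xs hx
        have hlen : ((x :: xs).drop (zeroPrefixB (x :: xs))).length ≤ N := by
          simp only [List.length_drop, List.length_cons]
          simp only [List.length_cons] at hc
          omega
        rw [ih _ hlen, runScan_prefix (x :: xs) 0]
        rw [List.append_assoc]
        congr 2
        rw [PySem.List.pyRange_one]
        have : (((zeroPrefixB (x :: xs) : Int) + 1 - 1)).toNat = zeroPrefixB (x :: xs) := by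
          omega
        rw [this]
        apply List.map_congr_left
        intro k _
        omega
      · rw [runsB, dif_neg hx]
        have hlen : xs.length ≤ N := by simp at hc; omega
        rw [ih _ hlen]
        simp [runScan, hx]

-- ---- runScan on a column produces the gcell column ----

def gprev (tab2 : List (List Int)) (j : Nat) : Nat → Int
  | 0 => 0
  | (k+1) => gcell tab2 k j

lemma runScan_col (tab2 : List (List Int)) (j : Nat) : ∀ (cnt i : Nat),
    runScan (gprev tab2 j i) ((List.range' i cnt).map (fun k => tcell tab2 k j))
      = (List.range' i cnt).map (fun k => gcell tab2 k j) := by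
  intro cnt
  induction cnt with
  | zero => intro i; simp [runScan]
  | succ c ih =>
    intro i
    rw [List.range'_succ]
    simp only [List.map_cons, runScan]
    have hv : (if tcell tab2 i j = 0 then gprev tab2 j i + 1 else 0) = gcell tab2 i j := by
      cases i with
      | zero => simp [gprev, gcell]
      | succ k => simp [gprev, gcell]
    rw [hv]
    have : gcell tab2 i j = gprev tab2 j (i + 1) := rfl
    rw [this, ih (i + 1)]

lemma colB (tab2 : List (List Int)) (N q : Nat) :
    runsB [] ((List.range N).map (fun k : Nat =>
        PySem.List.pyGetD (PySem.List.pyGetD tab2 (k : Int) []) (q : Int) 0))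
      = (List.range N).map (fun k => gcell tab2 k q) := by
  rw [runsB_eq_runScan ((List.range N).map (fun k : Nat =>
    PySem.List.pyGetD (PySem.List.pyGetD tab2 (k : Int) []) (q : Int) 0)).length _ le_rfl,
    List.nil_append, List.range_eq_range']
  have h := runScan_col tab2 q N 0
  simpa [gprev, tcell] using h

lemma B_eq_grid (tab2 : List (List Int)) (n : Int) :
    colonneZeros_alt tab2 n = grid tab2 n.toNat := by
  unfold colonneZeros_alt grid
  rw [range_cast]
  simp only [List.map_map, Function.comp_def]
  apply List.map_congr_left
  intro i hi
  rw [List.mem_range] at hi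
  apply List.map_congr_left
  intro q hq
  rw [List.mem_range] at hq
  rw [PySem.List.pyGetD_natCast, PySem.List.pyGetD_natCast, getD_map_range' _ _ _ hq,
    colB tab2 n.toNat q, getD_map_range' _ _ _ hi]

-- ---- A as a fold over Nat indices ----

def stepA (tab2 : List (List Int)) (j : Nat) (col : List (List Int)) (i : Nat) : List (List Int) :=
  if tcell tab2 i j = 0 then
    if (i : Int) = 0 then
      col.set i ((col.getD i []).set j 1)
    else
      col.set i ((col.getD i []).set j
        (PySem.List.pyGetD (PySem.List.pyGetD col ((i : Int) - 1) []) (j : Int) 0 + 1))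
  else
    col.set i ((col.getD i []).set j 0)

-- A's grid after the first j full columns and, in column j, the first b rows are written
def colA (tab2 : List (List Int)) (N j b : Nat) : List (List Int) :=
  (List.range N).map (fun r => (List.range N).map (fun q =>
    if q < j ∨ (q = j ∧ r < b) then gcell tab2 r q else 0))

lemma A_as_nat (tab2 : List (List Int)) (n : Int) :
    colonneZeros tab2 n
      = (List.range n.toNat).foldl
          (fun col j => (List.range n.toNat).foldl (stepA tab2 j) col)
          (colA tab2 n.toNat 0 0) := by
  have hinit : (List.range n.toNat).map
      (fun _ => List.map (fun _ => (0 : Int)) (List.range n.toNat)) = colA tab2 n.toNat 0 0 := by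
    apply List.map_congr_left
    intro r _
    apply List.map_congr_left
    intro q _
    simp
  unfold colonneZeros
  rw [range_cast]
  simp only [List.foldl_map, List.map_map]
  rw [show ((fun _ => List.map ((fun _ => (0 : Int)) ∘ fun k : Nat => (k : Int)) (List.range n.toNat)) ∘ (fun k : Nat => (k : Int))) = (fun _ : Nat => List.map (fun _ => (0 : Int)) (List.range n.toNat)) from rfl]
  rw [hinit]
  rfl

lemma setcell (tab2 : List (List Int)) (N j i : Nat) (hi : i < N) (hj : j < N) :
    (colA tab2 N j i).set i (((colA tab2 N j i).getD i []).set j (gcell tab2 i j))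
      = colA tab2 N j (i+1) := by
  unfold colA
  rw [getD_map_range' _ _ _ hi, set_map_range, set_map_range]
  apply List.map_congr_left
  intro r hr
  rw [List.mem_range] at hr
  by_cases hri : r = i
  · subst hri
    rw [if_pos rfl]
    apply List.map_congr_left
    intro q hq
    rw [List.mem_range] at hq
    by_cases hqj : q = j
    · subst hqj
      simp
    · rw [if_neg hqj]
      exact if_congr (by omega) rfl rfl
  · rw [if_neg hri]
    apply List.map_congr_left
    intro q hq
    exact if_congr (by omega) rfl rfl

lemma stepA_inv (tab2 : List (List Int)) (N j i : Nat) (hj : j < N) (hi : i < N) :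
    stepA tab2 j (colA tab2 N j i) i = colA tab2 N j (i+1) := by
  unfold stepA
  by_cases ht : tcell tab2 i j = 0
  · rw [if_pos ht]
    cases i with
    | zero =>
      rw [if_pos (by norm_num)]
      have h1 : (1 : Int) = gcell tab2 0 j := by simp [gcell, ht]
      rw [h1, setcell tab2 N j 0 hi hj]
    | succ m =>
      rw [if_neg (by exact_mod_cast Nat.succ_ne_zero m)]
      have hcast : ((m + 1 : Nat) : Int) - 1 = ((m : Nat) : Int) := by push_cast; ring
      have hm : m < N := by omega
      have hrow : (colA tab2 N j (m+1)).getD m []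
          = (List.range N).map (fun q => if q < j ∨ (q = j ∧ m < m+1) then gcell tab2 m q else 0) := by
        unfold colA
        rw [getD_map_range' _ _ _ hm]
      rw [hcast, PySem.List.pyGetD_natCast, PySem.List.pyGetD_natCast (colA tab2 N j (m+1)) m [],
        hrow, getD_map_range' _ _ _ hj]
      have hv : (if j < j ∨ (j = j ∧ m < m+1) then gcell tab2 m j else 0) + 1 = gcell tab2 (m+1) j := by
        rw [if_pos (by omega)]
        simp [gcell, ht]
      rw [hv, setcell tab2 N j (m+1) hi hj]
  · rw [if_neg ht]
    have h0 : (0 : Int) = gcell tab2 i j := by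
      cases i <;> simp [gcell, ht]
    rw [h0, setcell tab2 N j i hi hj]

lemma foldA_inner (tab2 : List (List Int)) (N j : Nat) (hj : j < N) :
    ∀ k, k ≤ N →
      (List.range k).foldl (stepA tab2 j) (colA tab2 N j 0) = colA tab2 N j k := by
  intro k
  induction k with
  | zero => simp
  | succ m ih =>
    intro hm
    rw [List.range_succ, List.foldl_append, ih (by omega), List.foldl_cons, List.foldl_nil,
      stepA_inv tab2 N j m hj (by omega)]

lemma colA_top (tab2 : List (List Int)) (N j : Nat) :
    colA tab2 N j N = colA tab2 N (j+1) 0 := by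
  unfold colA
  apply List.map_congr_left
  intro r hr
  rw [List.mem_range] at hr
  apply List.map_congr_left
  intro q _
  exact if_congr (by omega) rfl rfl

lemma foldA_outer (tab2 : List (List Int)) (N : Nat) :
    ∀ m, m ≤ N →
      (List.range m).foldl (fun col j => (List.range N).foldl (stepA tab2 j) col)
        (colA tab2 N 0 0) = colA tab2 N m 0 := by
  intro m
  induction m with
  | zero => simp
  | succ m ih =>
    intro hm
    rw [List.range_succ, List.foldl_append, ih (by omega), List.foldl_cons, List.foldl_nil,
      foldA_inner tab2 N m (by omega) N le_rfl, colA_top]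

lemma A_eq_grid (tab2 : List (List Int)) (n : Int) :
    colonneZeros tab2 n = grid tab2 n.toNat := by
  rw [A_as_nat, foldA_outer tab2 n.toNat n.toNat le_rfl]
  unfold colA grid
  apply List.map_congr_left
  intro r _
  apply List.map_congr_left
  intro q hq
  rw [List.mem_range] at hq
  rw [if_pos (by omega)]

-- ===== VERDICT (by name: the statement is the Claim_ definition above) =====
theorem colonneZeros_spec : Claim_equal_colonneZeros := by
  intro tab2 n _ _
  unfold Spec_colonneZeros
  rw [A_eq_grid, B_eq_grid]
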